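-- pv_equiv track=rewrite | github.com/julianschroeter/PyNovellaHistory | sent_fear_analysis/character_sympathy.py | sentence_counter
-- ===== SOURCE A (Python) =====
-- def sentence_counter(input_list):
--     sentence_count = 0
--     sentence_count_list = []
--     for i in input_list:
--         if i == 0:
--             sentence_count += 1
--             sentence_count_list.append(sentence_count)
--         else:
--             sentence_count_list.append(sentence_count)
--     return sentence_count_list
-- ===== SOURCE B (Python) =====
-- def sentence_counter(input_list):
--     # stage 1: positions of the zeros; stage 2: emit constant runs between them
--     zeros = [i for i, x in enumerate(input_list) if x == 0]
--     out = []
--     prev = 0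
--     for k, z in enumerate(zeros):
--         out.extend([k] * (z - prev))
--         out.append(k + 1)
--         prev = z + 1
--     out.extend([len(zeros)] * (len(input_list) - prev))
--     return out
-- ===== Notes on version B (the rewrite author's own statement) =====
-- stated objective: alternative
-- what changed: Replaces A's element-by-element loop with a running counter by a two-stage run-length construction: first collect the positions of the zeros, then build the output as constant blocks between consecutive zero positions, with no per-element counter or branch.
import Mathlib
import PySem

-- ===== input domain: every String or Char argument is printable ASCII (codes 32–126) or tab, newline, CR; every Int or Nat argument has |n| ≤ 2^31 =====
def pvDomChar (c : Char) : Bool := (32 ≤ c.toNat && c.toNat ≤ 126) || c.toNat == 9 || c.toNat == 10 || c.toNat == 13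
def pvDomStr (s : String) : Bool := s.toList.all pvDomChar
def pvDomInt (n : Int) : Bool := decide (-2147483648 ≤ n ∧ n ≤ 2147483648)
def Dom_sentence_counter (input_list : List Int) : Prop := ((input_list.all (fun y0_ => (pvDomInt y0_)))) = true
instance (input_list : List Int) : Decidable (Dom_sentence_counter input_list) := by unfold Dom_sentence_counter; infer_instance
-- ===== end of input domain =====

-- B replaces A's element-by-element counter loop by a two-stage run-length construction (collect zero positions, then emit constant blocks); return-value equivalence, same O(n) cost.


-- ===== PORT A =====
-- literal port of A's loop: state = (sentence_count, sentence_count_list), append on each step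
def sentence_counter (input_list : List Int) : List Int :=
  (input_list.foldl
    (fun (st : Int × List Int) i =>
      if i = 0 then (st.1 + 1, st.2 ++ [st.1 + 1])
      else (st.1, st.2 ++ [st.1]))
    (0, [])).2

-- ===== PORT B =====
-- stage 1 of Source B: [i for i, x in enumerate(l) if x == 0]; indices kept as Nat (exact: enumerate
-- indices are the nonnegative positions 0..len-1), via List.zipIdx
def pvZeros (l : List Int) : List Nat :=
  l.zipIdx.filterMap (fun p => if p.1 = 0 then some p.2 else none)

-- stage 2 of Source B: the for-loop over enumerate(zeros) plus the trailing extend, as the obvious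
-- structural recursion (k = current enumerate counter, prev, n = len(input_list)); Nat subtraction
-- in the replicate counts is exact: Python's [k]*(z-prev) is also empty when z-prev ≤ 0
def pvSeg (k : Int) (prev n : Nat) : List Nat → List Int
  | [] => List.replicate (n - prev) k
  | z :: zs => List.replicate (z - prev) k ++ (k + 1) :: pvSeg (k + 1) (z + 1) n zs

def sentence_counter_alt (input_list : List Int) : List Int :=
  pvSeg 0 0 input_list.length (pvZeros input_list)

-- ===== PRECONDITION & SPEC =====
def Spec_sentence_counter (input_list : List Int) (out : List Int) : Prop := out = sentence_counter_alt input_list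
instance (input_list : List Int) (out : List Int) : Decidable (Spec_sentence_counter input_list out) := by unfold Spec_sentence_counter; infer_instance

-- ===== CLAIM (what is proved, stated in full; the proofs are below) =====
def Claim_equal_sentence_counter : Prop := ∀ (input_list : List Int), Dom_sentence_counter input_list → Spec_sentence_counter input_list (sentence_counter input_list)

-- ===== LEMMAS AND PROOFS =====
-- both sides are related to the canonical value: entry i = zero-count of the prefix take (i+1)

-- A's fold, started at counter c with accumulated output acc
theorem sentence_counter_fold_eq (l : List Int) (c : Int) (acc : List Int) :
    (l.foldl
      (fun (st : Int × List Int) i =>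
        if i = 0 then (st.1 + 1, st.2 ++ [st.1 + 1])
        else (st.1, st.2 ++ [st.1]))
      (c, acc)).2
    = acc ++ (List.range l.length).map (fun i => c + ((l.take (i + 1)).count 0 : Int)) := by
  induction l generalizing c acc with
  | nil => simp
  | cons x xs ih =>
    by_cases hx : x = 0
    · simp only [List.foldl_cons, hx, ih, List.length_cons,
        List.range_succ_eq_map, List.map_cons, List.map_map]
      simp [List.append_assoc, Function.comp, add_assoc, add_comm]
    · simp only [List.foldl_cons, hx, ih, List.length_cons,
        List.range_succ_eq_map, List.map_cons, List.map_map]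
      simp [hx, List.append_assoc, Function.comp]

-- pvZeros over a shifted zipIdx start shifts every position
theorem pvZeros_shift (l : List Int) (s : Nat) :
    (l.zipIdx (s + 1)).filterMap (fun p => if p.1 = 0 then some p.2 else none)
      = ((l.zipIdx s).filterMap (fun p => if p.1 = 0 then some p.2 else none)).map (· + 1) := by
  induction l generalizing s with
  | nil => simp
  | cons x xs ih =>
    by_cases hx : x = 0 <;> simp [List.zipIdx_cons, hx, ih]

-- shifting positions, prev and n together leaves pvSeg unchanged
theorem pvSeg_shift (zs : List Nat) (k : Int) (prev n : Nat) :
    pvSeg k (prev + 1) (n + 1) (zs.map (· + 1)) = pvSeg k prev n zs := by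
  induction zs generalizing k prev with
  | nil => simp [pvSeg, Nat.succ_sub_succ]
  | cons z zs ih => simp [pvSeg, Nat.succ_sub_succ, ih]

-- prepending a nonzero element prepends one copy of the current counter
theorem pvSeg_cons_nz (zs : List Nat) (k : Int) (n : Nat) :
    pvSeg k 0 (n + 1) (zs.map (· + 1)) = k :: pvSeg k 0 n zs := by
  cases zs with
  | nil => simp [pvSeg, List.replicate_succ]
  | cons z zs =>
    simp only [List.map_cons, pvSeg, Nat.sub_zero, List.replicate_succ]
    rw [show z + 1 + 1 = (z + 1) + 1 from rfl, pvSeg_shift]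
    simp

-- B's two stages compute the canonical value, for any starting counter k
theorem pvSeg_zeros_eq (l : List Int) (k : Int) :
    pvSeg k 0 l.length (pvZeros l)
      = (List.range l.length).map (fun i => k + ((l.take (i + 1)).count 0 : Int)) := by
  induction l generalizing k with
  | nil => simp [pvZeros, pvSeg]
  | cons x xs ih =>
    have hzr : (xs.zipIdx 1).filterMap (fun p => if p.1 = 0 then some p.2 else none)
        = (pvZeros xs).map (· + 1) := pvZeros_shift xs 0
    by_cases hx : x = 0
    · have hz : pvZeros (x :: xs) = 0 :: (pvZeros xs).map (· + 1) := by
        simp [pvZeros, List.zipIdx_cons, hx, hzr]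
      rw [List.length_cons, hz]
      simp only [pvSeg, Nat.sub_self, List.replicate_zero, List.nil_append, Nat.zero_add]
      rw [show (1 : Nat) = 0 + 1 from rfl, pvSeg_shift, ih]
      simp only [List.range_succ_eq_map, List.map_cons, List.map_map]
      refine List.cons_eq_cons.mpr ⟨by simp [hx], ?_⟩
      refine List.map_congr_left (fun i _ => ?_)
      simp only [Function.comp_apply, List.take_succ_cons, List.count_cons, hx]
      simp
      ring
    · have hz : pvZeros (x :: xs) = (pvZeros xs).map (· + 1) := by
        simp [pvZeros, List.zipIdx_cons, hx, hzr]
      rw [List.length_cons, hz, pvSeg_cons_nz, ih]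
      simp only [List.range_succ_eq_map, List.map_cons, List.map_map]
      refine List.cons_eq_cons.mpr ⟨by simp [hx], ?_⟩
      refine List.map_congr_left (fun i _ => ?_)
      simp [Function.comp, List.take_succ_cons, hx]

-- ===== VERDICT (by name: the statement is the Claim_ definition above) =====
theorem sentence_counter_spec : Claim_equal_sentence_counter := by
  intro l _
  show _ = _
  rw [sentence_counter, sentence_counter_alt, sentence_counter_fold_eq l 0 [], pvSeg_zeros_eq l 0]
  simp
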